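-- pv_equiv track=rewrite | github.com/GSkorpik/EGE | Варианты/28_04/17.py | f
-- ===== SOURCE A (Python) =====
-- def f(n):
--     s=''
--     while n!=0:
--         a=n%3
--         s=str(a)+s
--         n//=3
--
--     if s[::-1]==s:
--         return True
--     return False
-- ===== SOURCE B (Python) =====
-- def f(n):
--     d = 0
--     while 3 ** d <= n:
--         d += 1
--     return all(n // 3 ** i % 3 == n // 3 ** (d - 1 - i) % 3 for i in range(d // 2))
-- ===== Notes on version B (the rewrite author's own statement) =====
-- stated objective: alternative
-- what changed: B never builds a digit string: it counts the base-3 digits with an exponent loop and then checks the symmetric digit pairs directly via n // 3**i % 3 over half the range, instead of accumulating a string and comparing it with its reversed slice.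
import Mathlib
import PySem

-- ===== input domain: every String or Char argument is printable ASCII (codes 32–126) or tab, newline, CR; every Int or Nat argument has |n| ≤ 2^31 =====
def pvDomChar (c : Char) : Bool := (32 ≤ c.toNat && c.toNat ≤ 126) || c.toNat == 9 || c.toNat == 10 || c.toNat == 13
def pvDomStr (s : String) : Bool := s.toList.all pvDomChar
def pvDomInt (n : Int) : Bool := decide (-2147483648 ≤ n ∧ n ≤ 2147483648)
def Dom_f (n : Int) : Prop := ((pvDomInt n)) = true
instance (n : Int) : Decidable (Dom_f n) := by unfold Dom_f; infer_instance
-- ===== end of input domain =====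

-- B counts the base-3 digits with an exponent loop and then checks symmetric digit
-- pairs by direct arithmetic (n // 3**i % 3), instead of building a digit string and
-- comparing it with its reversed slice (alternative algorithm).


-- ===== PORT A =====
-- A's while loop on n.toNat (exact for n ≥ 0, which Pre_f requires; for a ∈ {0,1,2},
-- str(a) is the single character with code 48 + a, prepended to s).
def fLoopA : Nat → List Char → List Char
  | 0, s => s
  | (n+1), s => fLoopA ((n+1) / 3) (Char.ofNat (48 + (n+1) % 3) :: s)
  decreasing_by exact Nat.div_lt_self (Nat.succ_pos n) (by norm_num)

def f (n : Int) : Bool :=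
  let s := fLoopA n.toNat []
  -- s[::-1] == s
  if s.reverse = s then true else false

-- ===== PORT B =====
-- B's `while 3 ** d <= n: d += 1` loop, on the original Int n.
def fCount (n : Int) (d : Nat) : Nat :=
  if (3 : Int) ^ d ≤ n then fCount n (d + 1) else d
  termination_by (n + 1 - 3 ^ d).toNat
  decreasing_by
    have h1 : (3 : Int) ^ d < 3 ^ (d + 1) := by
      have := pow_lt_pow_right₀ (by norm_num : (1:Int) < 3) (Nat.lt_succ_self d)
      exact this
    omega

-- all(n // 3**i % 3 == n // 3**(d-1-i) % 3 for i in range(d // 2))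
def f_alt (n : Int) : Bool :=
  let d := fCount n 0
  (List.range (d / 2)).all (fun i =>
    decide (PySem.Int.mod (PySem.Int.floordiv n ((3:Int) ^ i)) 3
          = PySem.Int.mod (PySem.Int.floordiv n ((3:Int) ^ (d - 1 - i))) 3))

-- ===== PRECONDITION & SPEC =====
-- Pre_f excludes n < 0, where A's loop never terminates (for negative n, n //= 3
-- never reaches 0 in Python, so A returns on exactly the inputs with n ≥ 0).
def Pre_f (n : Int) : Prop := 0 ≤ n
instance (n : Int) : Decidable (Pre_f n) := by unfold Pre_f; infer_instance
def pvWitness_f : Int := (13)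

def Spec_f (n : Int) (out : Bool) : Prop := out = f_alt n
instance (n : Int) (out : Bool) : Decidable (Spec_f n out) := by unfold Spec_f; infer_instance

-- ===== CLAIM (what is proved, stated in full; the proofs are below) =====
def Claim_equal_f : Prop := ∀ (n : Int), Dom_f n → Pre_f n → Spec_f n (f n)

-- ===== LEMMAS AND PROOFS =====

theorem fLoopA_eq (n : Nat) (s : List Char) :
    fLoopA n s = ((Nat.digits 3 n).map (fun d => Char.ofNat (48 + d))).reverse ++ s := by
  induction n using Nat.strong_induction_on generalizing s with
  | _ n ih =>
    cases n with
    | zero => simp [fLoopA]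
    | succ m =>
      rw [fLoopA, ih ((m+1)/3) (Nat.div_lt_self (Nat.succ_pos m) (by norm_num)),
        Nat.digits_def' (by norm_num : (1:Nat) < 3) (Nat.succ_pos m)]
      simp

theorem charmap_inj (L M : List Nat) (hL : ∀ x ∈ L, x < 3) (hM : ∀ x ∈ M, x < 3)
    (h : L.map (fun d => Char.ofNat (48 + d)) = M.map (fun d => Char.ofNat (48 + d))) :
    L = M := by
  induction L generalizing M with
  | nil => cases M with
    | nil => rfl
    | cons e M => simp at h
  | cons d L ih =>
    cases M with
    | nil => simp at h
    | cons e M =>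
      simp only [List.map_cons, List.cons.injEq] at h
      have hd := hL d (by simp)
      have he := hM e (by simp)
      have hde : d = e := by
        interval_cases d <;> interval_cases e <;> simp_all
      rw [hde, ih M (fun x hx => hL x (List.mem_cons_of_mem _ hx))
        (fun x hx => hM x (List.mem_cons_of_mem _ hx)) h.2]

theorem digits_getD (m i : Nat) : (Nat.digits 3 m).getD i 0 = m / 3 ^ i % 3 := by
  induction m using Nat.strong_induction_on generalizing i with
  | _ m ih =>
    cases m with
    | zero => simp
    | succ k =>
      rw [Nat.digits_def' (by norm_num : (1:Nat) < 3) (Nat.succ_pos k)]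
      cases i with
      | zero => simp
      | succ i =>
        simp only [List.getD_cons_succ]
        rw [ih ((k+1)/3) (Nat.div_lt_self (Nat.succ_pos k) (by norm_num)),
          Nat.div_div_eq_div_mul, pow_succ, mul_comm]

theorem fCount_eq (m d : Nat) (hd : d ≤ (Nat.digits 3 m).length) :
    fCount (m : Int) d = (Nat.digits 3 m).length := by
  -- induction on the gap length - d
  have key : ∀ k d, (Nat.digits 3 m).length - d = k → d ≤ (Nat.digits 3 m).length →
      fCount (m : Int) d = (Nat.digits 3 m).length := by
    intro k
    induction k with
    | zero =>
      intro d hk hle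
      have hlen : (Nat.digits 3 m).length = d := by omega
      rw [fCount, if_neg]
      · exact hlen.symm
      · have h1 : m < 3 ^ d := by
          rw [← hlen]; exact Nat.lt_base_pow_length_digits (by norm_num)
        exact not_le.mpr (by exact_mod_cast h1)
    | succ k ih =>
      intro d hk hle
      have hdlt : d < (Nat.digits 3 m).length := by omega
      have hm0 : m ≠ 0 := by
        intro h0; rw [h0] at hdlt; simp at hdlt
      have hcond : (3 : Int) ^ d ≤ (m : Int) := by
        have h2 : 3 ^ (Nat.digits 3 m).length ≤ 3 * m :=
          Nat.base_pow_length_digits_le 3 m (by norm_num) hm0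
      -- 3^(len-1) ≤ m, and d ≤ len-1
        have h3 : 3 ^ ((Nat.digits 3 m).length - 1) * 3 ≤ 3 * m := by
          rw [← pow_succ]
          have : (Nat.digits 3 m).length - 1 + 1 = (Nat.digits 3 m).length := by omega
          rw [this]; exact h2
        have h4 : 3 ^ ((Nat.digits 3 m).length - 1) ≤ m := by omega
        have h5 : 3 ^ d ≤ 3 ^ ((Nat.digits 3 m).length - 1) :=
          Nat.pow_le_pow_right (by norm_num) (by omega)
        exact_mod_cast le_trans h5 h4
      rw [fCount, if_pos hcond]
      exact ih (d + 1) (by omega) (by omega)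
  exact key _ d rfl hd

theorem palindrome_iff_half (L : List Nat) :
    L.reverse = L ↔ ∀ i < L.length / 2, L.getD i 0 = L.getD (L.length - 1 - i) 0 := by
  have hsome : ∀ j, j < L.length → L[j]? = some (L.getD j 0) := fun j hj => by
    rw [List.getElem?_eq_getElem hj, List.getD_eq_getElem _ _ hj]
  constructor
  · intro h i hi
    have hlt : i < L.length := by omega
    calc L.getD i 0 = L.reverse.getD i 0 := by rw [h]
      _ = (L.reverse[i]?).getD 0 := List.getD_eq_getElem?_getD
      _ = (L[L.length - 1 - i]?).getD 0 := by rw [List.getElem?_reverse hlt]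
      _ = L.getD (L.length - 1 - i) 0 := List.getD_eq_getElem?_getD.symm
  · intro h
    apply List.ext_getElem?
    intro i
    by_cases hi' : i < L.length
    · rw [List.getElem?_reverse hi', hsome _ (by omega), hsome _ hi', Option.some_inj]
      rcases lt_or_ge i (L.length / 2) with hc | hc
      · exact (h i hc).symm
      · rcases lt_or_ge (L.length - 1 - i) (L.length / 2) with hc2 | hc2
        · have := h (L.length - 1 - i) hc2
          rwa [show L.length - 1 - (L.length - 1 - i) = i from by omega] at this
        · rw [show L.length - 1 - i = i from by omega]
    · rw [List.getElem?_eq_none (by simp; omega), List.getElem?_eq_none (by omega)]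

-- ===== VERDICT (by name: the statement is the Claim_ definition above) =====
theorem f_spec : Claim_equal_f := by
  intro n _ hpre
  unfold Spec_f f f_alt
  set m := n.toNat with hm
  have hn : ((m : Int)) = n := Int.toNat_of_nonneg hpre
  set L := Nat.digits 3 m with hL
  have hlt : ∀ x ∈ L, x < 3 := fun x hx => Nat.digits_lt_base (by norm_num) hx
  have hd : fCount n 0 = L.length := by
    rw [← hn]; exact fCount_eq m 0 (Nat.zero_le _)
  -- A's result ↔ digits palindrome
  have hA : (if (fLoopA m []).reverse = fLoopA m [] then true else false) = true ↔
      L.reverse = L := by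
    rw [fLoopA_eq]
    simp only [List.append_nil, List.reverse_reverse]
    constructor
    · intro h
      split_ifs at h with hc
      · rw [← List.map_reverse] at hc
        exact (charmap_inj L L.reverse hlt
          (fun x hx => hlt x (List.mem_reverse.mp hx)) hc).symm
    · intro h
      rw [if_pos]
      rw [← List.map_reverse, h]
  -- B's result ↔ half digit check
  have harith : ∀ j : Nat, PySem.Int.mod (PySem.Int.floordiv n ((3:Int) ^ j)) 3
      = ((m / 3 ^ j % 3 : Nat) : Int) := by
    intro j
    rw [← hn, show ((3:Int) ^ j) = ((3 ^ j : Nat) : Int) from by push_cast; ring,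
      PySem.Int.floordiv_natCast, show ((3:Int) = ((3:Nat):Int)) from rfl,
      PySem.Int.mod_natCast]
  have hB : ((List.range (fCount n 0 / 2)).all (fun i =>
      decide (PySem.Int.mod (PySem.Int.floordiv n ((3:Int) ^ i)) 3
            = PySem.Int.mod (PySem.Int.floordiv n ((3:Int) ^ (fCount n 0 - 1 - i))) 3)) = true) ↔
      (∀ i < L.length / 2, L.getD i 0 = L.getD (L.length - 1 - i) 0) := by
    rw [List.all_eq_true]
    constructor
    · intro h i hi
      have := h i (List.mem_range.mpr (by omega))
      rw [decide_eq_true_iff, harith i, harith (fCount n 0 - 1 - i)] at this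
      have h2 := Nat.cast_injective this
      rw [hd] at h2
      rw [digits_getD, digits_getD]
      exact h2
    · intro h i hi
      rw [List.mem_range] at hi
      rw [decide_eq_true_iff, harith i, harith (fCount n 0 - 1 - i), hd]
      have := h i (by omega)
      rw [digits_getD, digits_getD] at this
      exact_mod_cast this
  rw [hd] at hB
  have hiff := (hA.trans (palindrome_iff_half L)).trans hB.symm
  rw [hd]
  cases hx : (if (fLoopA m []).reverse = fLoopA m [] then true else false) with
  | true => exact (hiff.mp hx).symm
  | false =>
    cases hy : ((List.range (L.length / 2)).all _) with
    | true => exact absurd (hiff.mpr hy) (by simp [hx])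
    | false => rfl
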